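-- pv_equiv track=rewrite | github.com/breakthatbass/advent_of_code | 2025/day03/a.py | get_max_digit_and_index
-- ===== SOURCE A (Python) =====
-- def get_max_digit_and_index(bank, ignore_last_digit=False):
--     largest = 0
--     index = 0
--     bank_iter = bank[:-1] if ignore_last_digit else bank
--     for i, digit in enumerate(bank_iter):
--         if int(digit) > largest:
--             largest = int(digit)
--             index = i
--     return (largest, index)
-- ===== SOURCE B (Python) =====
-- def get_max_digit_and_index(bank, ignore_last_digit=False):
--     seq = bank[:-1] if ignore_last_digit else bank
--     vals = [int(d) for d in seq]
--     m = max(vals, default=0)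
--     if m <= 0:
--         return (0, 0)
--     return (m, vals.index(m))
-- ===== Notes on version B (the rewrite author's own statement) =====
-- stated objective: simpler
-- what changed: Replaces A's single fused tracking loop (running max + index updated in one pass) by a decomposition: map the strings to ints once, take max with default 0, and if it is positive look up its first index with list.index.
import Mathlib
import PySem

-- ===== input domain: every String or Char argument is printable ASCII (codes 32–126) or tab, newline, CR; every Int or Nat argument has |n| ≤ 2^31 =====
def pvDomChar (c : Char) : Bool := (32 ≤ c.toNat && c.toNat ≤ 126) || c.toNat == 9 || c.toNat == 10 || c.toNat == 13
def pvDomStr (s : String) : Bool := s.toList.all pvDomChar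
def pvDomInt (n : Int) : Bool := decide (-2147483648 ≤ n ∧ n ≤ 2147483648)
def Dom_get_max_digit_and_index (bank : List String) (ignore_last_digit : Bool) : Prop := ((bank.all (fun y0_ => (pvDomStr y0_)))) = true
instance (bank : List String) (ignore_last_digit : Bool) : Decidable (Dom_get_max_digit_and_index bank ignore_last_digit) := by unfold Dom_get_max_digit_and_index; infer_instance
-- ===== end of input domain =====

-- B splits A's fused running-max/index loop into map-to-ints, max (default 0), then a first-index lookup; same cost, plainer shape.

-- ===== PORT A =====
-- the for-loop of A: state (largest, index), i is the enumerate counter; int(digit) is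
-- PySem.Int.ofStr? (Pre_ guarantees it parses; .getD 0 is never taken inside Pre_)
def pvALoop (xs : List String) (i : Nat) (largest index : Int) : Int × Int :=
  match xs with
  | [] => (largest, index)
  | d :: rest =>
    if (PySem.Int.ofStr? d).getD 0 > largest then
      pvALoop rest (i + 1) ((PySem.Int.ofStr? d).getD 0) (i : Int)
    else
      pvALoop rest (i + 1) largest index

def get_max_digit_and_index (bank : List String) (ignore_last_digit : Bool) : Int × Int :=
  let bank_iter := if ignore_last_digit then PySem.List.slice bank none (some (-1)) else bank
  pvALoop bank_iter 0 0 0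

-- ===== PORT B =====
def get_max_digit_and_index_alt (bank : List String) (ignore_last_digit : Bool) : Int × Int :=
  let seq := if ignore_last_digit then PySem.List.slice bank none (some (-1)) else bank
  let vals := seq.map (fun d => (PySem.Int.ofStr? d).getD 0)
  let m := (PySem.List.max? vals (fun x => x)).getD 0
  if m ≤ 0 then (0, 0)
  else (m, ((PySem.List.index? vals m).getD 0 : Nat))

-- ===== PRECONDITION & SPEC =====
-- Pre_ excludes exactly the inputs where int(digit) raises ValueError in A (B raises there too).
def Pre_get_max_digit_and_index (bank : List String) (ignore_last_digit : Bool) : Prop :=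
  ∀ d ∈ (if ignore_last_digit then PySem.List.slice bank none (some (-1)) else bank),
    (PySem.Int.ofStr? d).isSome = true
instance (bank : List String) (ignore_last_digit : Bool) : Decidable (Pre_get_max_digit_and_index bank ignore_last_digit) := by unfold Pre_get_max_digit_and_index; infer_instance

def pvWitness_get_max_digit_and_index : List String × Bool := (["3", "1", "5", "x"], true)

def Spec_get_max_digit_and_index (bank : List String) (ignore_last_digit : Bool) (out : Int × Int) : Prop := out = get_max_digit_and_index_alt bank ignore_last_digit
instance (bank : List String) (ignore_last_digit : Bool) (out : Int × Int) : Decidable (Spec_get_max_digit_and_index bank ignore_last_digit out) := by unfold Spec_get_max_digit_and_index; infer_instance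

-- ===== CLAIM (what is proved, stated in full; the proofs are below) =====
def Claim_equal_get_max_digit_and_index : Prop := ∀ (bank : List String) (ignore_last_digit : Bool), Dom_get_max_digit_and_index bank ignore_last_digit → Pre_get_max_digit_and_index bank ignore_last_digit → Spec_get_max_digit_and_index bank ignore_last_digit (get_max_digit_and_index bank ignore_last_digit)

-- ===== LEMMAS AND PROOFS =====

-- A's loop, abstracted to the list of already-parsed ints
def pvLoopV (vs : List Int) (i : Nat) (largest index : Int) : Int × Int :=
  match vs with
  | [] => (largest, index)
  | v :: rest =>
    if v > largest then pvLoopV rest (i + 1) v (i : Int)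
    else pvLoopV rest (i + 1) largest index

lemma pvALoop_eq_loopV (xs : List String) (i : Nat) (L I : Int) :
    pvALoop xs i L I = pvLoopV (xs.map (fun d => (PySem.Int.ofStr? d).getD 0)) i L I := by
  induction xs generalizing i L I with
  | nil => rfl
  | cons d rest ih => simp only [pvALoop, pvLoopV, List.map_cons]; split <;> exact ih ..

lemma le_foldl_max (t : List Int) (a : Int) : a ≤ t.foldl max a := by
  induction t generalizing a with
  | nil => simp
  | cons v rest ih => exact le_trans (le_max_left a v) (ih (max a v))

lemma foldl_max_comm (t : List Int) (a b : Int) :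
    t.foldl max (max a b) = max a (t.foldl max b) := by
  induction t generalizing b with
  | nil => rfl
  | cons v rest ih =>
    simp only [List.foldl_cons]
    rw [max_assoc, ih]

lemma foldl_max_eq_or_mem (t : List Int) (a : Int) :
    t.foldl max a = a ∨ t.foldl max a ∈ t := by
  induction t generalizing a with
  | nil => left; rfl
  | cons v rest ih =>
    simp only [List.foldl_cons]
    rcases ih (max a v) with h | h
    · rcases max_cases a v with ⟨hm, _⟩ | ⟨hm, _⟩
      · left; rw [h, hm]
      · right; rw [h, hm]; exact List.mem_cons_self
    · right; exact List.mem_cons_of_mem _ h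

-- the loop computes the running max and the first index where the overall max beats the seed
lemma loopV_spec (vs : List Int) (i : Nat) (L I : Int) :
    pvLoopV vs i L I =
      if L < vs.foldl max L then
        (vs.foldl max L, (i : Int) + ((PySem.List.index? vs (vs.foldl max L)).getD 0 : Nat))
      else (L, I) := by
  induction vs generalizing i L I with
  | nil => simp [pvLoopV]
  | cons v rest ih =>
    simp only [pvLoopV, List.foldl_cons]
    by_cases hv : v > L
    · rw [if_pos hv, ih, max_eq_right (le_of_lt hv)]
      have hvm : v ≤ rest.foldl max v := le_foldl_max rest v
      have hLm : L < rest.foldl max v := lt_of_lt_of_le hv hvm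
      rw [if_pos hLm]
      by_cases hvlt : v < rest.foldl max v
      · rw [if_pos hvlt]
        have hmem : rest.foldl max v ∈ rest := by
          rcases foldl_max_eq_or_mem rest v with h | h
          · omega
          · exact h
        have hne : v ≠ rest.foldl max v := ne_of_lt hvlt
        rw [PySem.List.index?_cons_of_ne rest hne]
        obtain ⟨k, hk⟩ := Option.isSome_iff_exists.mp
          ((PySem.List.index?_isSome_iff rest (rest.foldl max v)).mpr hmem)
        rw [hk]
        simp only [Option.map_some, Option.getD_some, Prod.mk.injEq, true_and]
        push_cast
        omega
      · rw [if_neg hvlt]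
        have : rest.foldl max v = v := le_antisymm (by omega) hvm
        rw [this, PySem.List.index?_cons_self]
        simp
    · rw [if_neg hv, ih, max_eq_left (by omega)]
      by_cases hLm : L < rest.foldl max L
      · rw [if_pos hLm, if_pos hLm]
        have hmem : rest.foldl max L ∈ rest := by
          rcases foldl_max_eq_or_mem rest L with h | h
          · omega
          · exact h
        have hne : v ≠ rest.foldl max L := by omega
        rw [PySem.List.index?_cons_of_ne rest hne]
        obtain ⟨k, hk⟩ := Option.isSome_iff_exists.mp
          ((PySem.List.index?_isSome_iff rest (rest.foldl max L)).mpr hmem)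
        rw [hk]
        simp only [Option.map_some, Option.getD_some, Prod.mk.injEq, true_and]
        push_cast
        omega
      · rw [if_neg hLm, if_neg hLm]

-- B's branch structure, stated over the parsed value list
lemma b_side (vals : List Int) :
    (if (0:Int) < vals.foldl max 0 then
        (vals.foldl max 0, ((0:Nat) : Int) + (((PySem.List.index? vals (vals.foldl max 0)).getD 0 : Nat) : Int))
      else (0, 0)) =
    (if ((PySem.List.max? vals (fun x => x)).getD 0) ≤ 0 then ((0:Int), (0:Int))
      else ((PySem.List.max? vals (fun x => x)).getD 0,
            (((PySem.List.index? vals ((PySem.List.max? vals (fun x => x)).getD 0)).getD 0 : Nat) : Int))) := by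
  cases vals with
  | nil => simp [PySem.List.max?]
  | cons v t =>
    rw [PySem.List.max?_id_cons]
    simp only [List.foldl_cons, Option.getD_some]
    rw [foldl_max_comm t 0 v]
    by_cases hpos : 0 < t.foldl max v
    · rw [if_pos (by omega), max_eq_right (by omega), if_neg (by omega)]
      simp
    · rw [if_neg (by omega), if_pos (by omega)]

-- ===== VERDICT (by name: the statement is the Claim_ definition above) =====
theorem get_max_digit_and_index_spec : Claim_equal_get_max_digit_and_index := by
  intro bank ign _ _
  unfold Spec_get_max_digit_and_index get_max_digit_and_index get_max_digit_and_index_alt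
  rw [pvALoop_eq_loopV, loopV_spec]
  exact b_side _
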